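-- pv_equiv track=rewrite | github.com/nickpinecone/backend-lab | algorithms/lab3/task1.py | solve
-- ===== SOURCE A (Python) =====
-- class Deque:
--     def __init__(self, max_len):
--         self.max_len = max_len
--         self.values = [0] * max_len
--         self.len = 0
--         self.head = 0
--         self.tail = 0
--
--     def push_front(self, value):
--         if self.len >= self.max_len:
--             return "error"
--
--         self.values[self.head] = value
--         self.head = (self.head + 1) % self.max_len
--         self.len += 1
--
--     def push_back(self, value):
--         if self.len >= self.max_len:
--             return "error"
--
--         self.tail = (self.tail - 1) % self.max_len
--         self.values[self.tail] = value
--         self.len += 1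
--
--     def pop_front(self):
--         if self.len <= 0:
--             return "error"
--
--         self.head = (self.head - 1) % self.max_len
--         self.len -= 1
--         return self.values[self.head]
--
--     def pop_back(self):
--         if self.len <= 0:
--             return "error"
--
--         value = self.values[self.tail]
--         self.tail = (self.tail + 1) % self.max_len
--         self.len -= 1
--         return value
--
-- def solve(deque_size, commands):
--     arr = []
--     deque = Deque(deque_size)
--
--     for command in commands:
--         if command == "pop_front":
--             arr.append(deque.pop_front())
--         elif command == "pop_back":
--             arr.append(deque.pop_back())
--         else:
--             split = command.split(" ")
--             name = split[0]
--             value = split[1]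
--
--             if name == "push_front":
--                 result = deque.push_front(value)
--                 if result is not None:
--                     arr.append(result)
--             elif name == "push_back":
--                 result = deque.push_back(value)
--                 if result is not None:
--                     arr.append(result)
--
--     return arr
-- ===== SOURCE B (Python) =====
-- def solve(deque_size, commands):
--     out = []
--     # Two-stack (lazy-reversal) deque: abstract contents front-to-back = front[::-1] + back.
--     front, back = [], []
--     for command in commands:
--         if command == "pop_front":
--             if not front:
--                 front, back = back[::-1], []
--             if front:
--                 out.append(front.pop())
--             else:
--                 out.append("error")
--         elif command == "pop_back":
--             if not back:
--                 back, front = front[::-1], []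
--             if back:
--                 out.append(back.pop())
--             else:
--                 out.append("error")
--         else:
--             parts = command.split(" ")
--             name, value = parts[0], parts[1]
--             if name in ("push_front", "push_back"):
--                 if len(front) + len(back) >= deque_size:
--                     out.append("error")
--                 elif name == "push_front":
--                     front.append(value)
--                 else:
--                     back.append(value)
--     return out
-- ===== Notes on version B (the rewrite author's own statement) =====
-- stated objective: alternative
-- what changed: Replaces the fixed-size circular buffer with modular head/tail index arithmetic by the classic two-stack deque: a front stack and a back stack, pushes go onto their own stack and a pop from an empty side lazily reverses the other stack.
import Mathlib
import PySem

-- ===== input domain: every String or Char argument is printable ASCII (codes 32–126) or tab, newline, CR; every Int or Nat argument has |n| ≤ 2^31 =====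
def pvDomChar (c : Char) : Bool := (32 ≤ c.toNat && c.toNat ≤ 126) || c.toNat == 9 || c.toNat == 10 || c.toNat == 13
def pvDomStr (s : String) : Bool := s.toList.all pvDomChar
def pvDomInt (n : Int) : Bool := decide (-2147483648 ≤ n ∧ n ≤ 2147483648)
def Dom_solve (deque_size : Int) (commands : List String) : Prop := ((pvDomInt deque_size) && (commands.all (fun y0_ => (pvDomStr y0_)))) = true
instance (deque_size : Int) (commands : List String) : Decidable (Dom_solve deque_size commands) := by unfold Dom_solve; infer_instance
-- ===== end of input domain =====

-- B replaces A's fixed-size circular buffer (modular head/tail index arithmetic over a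
-- preallocated array) with the classic two-stack deque (lazy reversal); objective: alternative.

-- ===== PORT A =====
-- The Python buffer is initialised as [0]*max_len (int placeholders); under Pre_solve a slot is
-- only ever READ after it was written with a string, so the placeholders are modelled as "".
structure DequeA where
  maxLen : Int
  values : List String
  len : Int
  head : Int
  tail : Int
deriving Repr

def dqInit (m : Int) : DequeA := ⟨m, List.replicate m.toNat "", 0, 0, 0⟩

def dqPushFront (d : DequeA) (v : String) : DequeA × Option String :=
  if d.len ≥ d.maxLen then (d, some "error")
  else ({ d with
            values := PySem.List.pySetD d.values d.head v
            head := PySem.Int.mod (d.head + 1) d.maxLen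
            len := d.len + 1 }, none)

def dqPushBack (d : DequeA) (v : String) : DequeA × Option String :=
  if d.len ≥ d.maxLen then (d, some "error")
  else ({ d with
        tail := PySem.Int.mod (d.tail - 1) d.maxLen
        values := PySem.List.pySetD d.values (PySem.Int.mod (d.tail - 1) d.maxLen) v
        len := d.len + 1 }, none)

def dqPopFront (d : DequeA) : DequeA × String :=
  if d.len ≤ 0 then (d, "error")
  else ({ d with
        head := PySem.Int.mod (d.head - 1) d.maxLen
        len := d.len - 1 }, PySem.List.pyGetD d.values (PySem.Int.mod (d.head - 1) d.maxLen) "")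

def dqPopBack (d : DequeA) : DequeA × String :=
  if d.len ≤ 0 then (d, "error")
  else ({ d with
        tail := PySem.Int.mod (d.tail + 1) d.maxLen
        len := d.len - 1 }, PySem.List.pyGetD d.values d.tail "")

-- split[1] raises IndexError in Python on a command without ' '; Pre_solve excludes those
-- commands, so the total pyGetD … "" default is never the value used.
def solveStepA (st : List String × DequeA) (c : String) : List String × DequeA :=
  if c = "pop_front" then
    let r := dqPopFront st.2; (st.1 ++ [r.2], r.1)
  else if c = "pop_back" then
    let r := dqPopBack st.2; (st.1 ++ [r.2], r.1)
  else
    let split := (PySem.Str.split? c " ").getD []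
    let name := PySem.List.pyGetD split 0 ""
    let value := PySem.List.pyGetD split 1 ""
    if name = "push_front" then
      let r := dqPushFront st.2 value
      ((match r.2 with | some s => st.1 ++ [s] | none => st.1), r.1)
    else if name = "push_back" then
      let r := dqPushBack st.2 value
      ((match r.2 with | some s => st.1 ++ [s] | none => st.1), r.1)
    else st

def solve (deque_size : Int) (commands : List String) : List String :=
  (commands.foldl solveStepA ([], dqInit deque_size)).1

-- ===== PORT B =====
-- Two-stack deque: front/back are Python lists used as stacks (top at the END, as in Source B);
-- the deque's contents front-to-back are front.reverse ++ back.  A pop from an empty side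
-- first moves the reversed other stack over (lazy reversal), exactly as Source B does.
def solveStepB (deque_size : Int) (st : List String × List String × List String) (c : String) :
    List String × List String × List String :=
  let out := st.1
  if c = "pop_front" then
    let fb := if st.2.1 = [] then (st.2.2.reverse, ([] : List String)) else (st.2.1, st.2.2)
    if fb.1 = [] then (out ++ ["error"], fb.1, fb.2)
    else (out ++ [fb.1.getLast?.getD ""], fb.1.dropLast, fb.2)
  else if c = "pop_back" then
    let bf := if st.2.2 = [] then (st.2.1.reverse, ([] : List String)) else (st.2.2, st.2.1)
    if bf.1 = [] then (out ++ ["error"], bf.2, bf.1)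
    else (out ++ [bf.1.getLast?.getD ""], bf.2, bf.1.dropLast)
  else
    let parts := (PySem.Str.split? c " ").getD []
    let name := PySem.List.pyGetD parts 0 ""
    let value := PySem.List.pyGetD parts 1 ""
    if name = "push_front" ∨ name = "push_back" then
      if ((st.2.1.length : Int) + (st.2.2.length : Int)) ≥ deque_size then
        (out ++ ["error"], st.2.1, st.2.2)
      else if name = "push_front" then (out, st.2.1 ++ [value], st.2.2)
      else (out, st.2.1, st.2.2 ++ [value])
    else st

def solve_alt (deque_size : Int) (commands : List String) : List String :=
  (commands.foldl (solveStepB deque_size) ([], [], [])).1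

-- ===== PRECONDITION & SPEC =====
-- Pre_solve excludes exactly the commands on which the Python A raises IndexError at split[1]
-- (a command that is neither "pop_front" nor "pop_back" and contains no space); B raises there too.
def Pre_solve (deque_size : Int) (commands : List String) : Prop :=
  ∀ c ∈ commands, c = "pop_front" ∨ c = "pop_back" ∨ PySem.Str.isIn " " c = true
instance (deque_size : Int) (commands : List String) : Decidable (Pre_solve deque_size commands) := by unfold Pre_solve; infer_instance

def pvWitness_solve : Int × List String := (2, ["push_back 1", "push_front 2", "push_back 3", "pop_front", "pop_back", "pop_back"])

def Spec_solve (deque_size : Int) (commands : List String) (out : List String) : Prop := out = solve_alt deque_size commands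
instance (deque_size : Int) (commands : List String) (out : List String) : Decidable (Spec_solve deque_size commands out) := by unfold Spec_solve; infer_instance

-- ===== CLAIM (what is proved, stated in full; the proofs are below) =====
def Claim_equal_solve : Prop := ∀ (deque_size : Int) (commands : List String), Dom_solve deque_size commands → Pre_solve deque_size commands → Spec_solve deque_size commands (solve deque_size commands)

-- ===== LEMMAS AND PROOFS =====

-- Ghost reference machine used only by the proofs: the deque as ONE plain list (front first).
-- A is related to it by a circular-buffer invariant, B by front.reverse ++ back = dq.
def solveStepG (deque_size : Int) (st : List String × List String) (c : String) : List String × List String :=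
  if c = "pop_front" then
    if st.2 = [] then (st.1 ++ ["error"], st.2)
    else (st.1 ++ [st.2.headD "error"], st.2.tail)
  else if c = "pop_back" then
    if st.2 = [] then (st.1 ++ ["error"], st.2)
    else (st.1 ++ [st.2.getLast?.getD ""], st.2.dropLast)
  else
    let parts := (PySem.Str.split? c " ").getD []
    let name := PySem.List.pyGetD parts 0 ""
    let value := PySem.List.pyGetD parts 1 ""
    if name = "push_front" ∨ name = "push_back" then
      if (st.2.length : Int) ≥ deque_size then (st.1 ++ ["error"], st.2)
      else if name = "push_front" then (st.1, value :: st.2)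
      else (st.1, st.2 ++ [value])
    else st

-- Invariant tying A's circular-buffer state to the ghost plain list: lengths agree, and for a
-- positive capacity the i-th element of dq (front first) sits at buffer index (head-1-i) mod maxLen.
def InvDQ (ds : Int) (d : DequeA) (dq : List String) : Prop :=
  d.maxLen = ds ∧ d.len = (dq.length : Int) ∧
  (0 < ds →
    (dq.length : Int) ≤ ds ∧ d.values.length = ds.toNat ∧
    0 ≤ d.head ∧ d.head < ds ∧
    PySem.Int.mod (d.head - d.len) ds = d.tail ∧
    ∀ i : Nat, i < dq.length → dq[i]? = d.values[(PySem.Int.mod (d.head - 1 - (i : Int)) ds).toNat]?) ∧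
  (ds ≤ 0 → dq = [])

lemma invDQ_init (ds : Int) : InvDQ ds (dqInit ds) [] := by
  refine ⟨rfl, rfl, fun h => ?_, fun _ => rfl⟩
  refine ⟨by simp; omega, by simp [dqInit], le_refl 0, h, ?_, fun i hi => by simp at hi⟩
  show PySem.Int.mod (0 - 0) ds = 0
  rw [PySem.Int.mod_eq_emod_of_pos h]
  simp

-- Adding t before or after reducing mod ds is the same.
lemma emod_shift (ds a t : Int) : (a % ds + t) % ds = (a + t) % ds := by
  conv_rhs => rw [Int.add_emod]
  rw [Int.add_emod (a % ds) t, Int.emod_emod_of_dvd a dvd_rfl]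

lemma emod_shift_sub (ds a t : Int) : (a % ds - t) % ds = (a - t) % ds := by
  simpa [sub_eq_add_neg] using emod_shift ds a (-t)

-- (b - k) mod ds cannot land back on b when 0 < k < ds and 0 ≤ b < ds.
lemma mod_sub_ne (ds b k : Int) (hds : 0 < ds) (hb0 : 0 ≤ b) (hbd : b < ds)
    (hk0 : 0 < k) (hkd : k < ds) : PySem.Int.mod (b - k) ds ≠ b := by
  rw [PySem.Int.mod_eq_emod_of_pos hds]
  intro hEq
  have h1 : (b - k) % ds = b % ds := by rw [hEq, Int.emod_eq_of_lt hb0 hbd]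
  have h3 : ds ∣ (b - k - b) := Int.dvd_of_emod_eq_zero (Int.emod_eq_emod_iff_emod_sub_eq_zero.mp h1)
  have h4 : ds ∣ k := by
    have he : b - k - b = -k := by ring
    rw [he] at h3
    exact (Int.dvd_neg).mp h3
  have := Int.le_of_dvd hk0 h4
  omega

lemma popFront_lemma (ds : Int) (d : DequeA) (dq : List String) (h : InvDQ ds d dq) :
    (dqPopFront d).2 = dq.headD "error" ∧ InvDQ ds (dqPopFront d).1 dq.tail := by
  obtain ⟨hm, hl, hpos, hneg⟩ := h
  unfold dqPopFront
  cases dq with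
  | nil =>
    have hl0 : d.len ≤ 0 := by simp at hl; omega
    rw [if_pos hl0]
    exact ⟨rfl, hm, hl, hpos, hneg⟩
  | cons v rest =>
    have hds : 0 < ds := by
      by_contra hc
      exact absurd (hneg (by omega)) (by simp)
    obtain ⟨hle, hvlen, hh0, hhlt, htail, hwin⟩ := hpos hds
    have hlen : d.len = (rest.length : Int) + 1 := by simp at hl; omega
    rw [if_neg (by omega)]
    simp only [hm]
    constructor
    · have h0 := hwin 0 (by simp)
      simp only [List.getElem?_cons_zero, Nat.cast_zero, sub_zero] at h0
      rw [PySem.List.pyGetD_of_nonneg _ _ (PySem.Int.mod_nonneg _ hds),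
        List.getD_eq_getElem?_getD, ← h0]
      rfl
    · refine ⟨rfl, by simp; omega, fun _ => ?_, fun h0 => absurd hds (by omega)⟩
      refine ⟨by simp at hle ⊢; omega, hvlen, PySem.Int.mod_nonneg _ hds,
        PySem.Int.mod_lt _ hds, ?_, ?_⟩
      · show PySem.Int.mod (PySem.Int.mod (d.head - 1) ds - (d.len - 1)) ds = d.tail
        rw [← htail]
        simp only [PySem.Int.mod_eq_emod_of_pos hds]
        rw [emod_shift_sub]
        congr 1
        ring
      · intro i hi
        have hw := hwin (i + 1) (by simp at hi ⊢; omega)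
        simp only [List.getElem?_cons_succ] at hw
        show rest[i]? = _
        rw [hw]
        congr 2
        simp only [PySem.Int.mod_eq_emod_of_pos hds]
        symm
        have e1 : (d.head - 1) % ds - 1 - (i : Int) = (d.head - 1) % ds - (1 + (i : Int)) := by ring
        rw [e1, emod_shift_sub]
        congr 1
        push_cast
        ring

lemma popBack_lemma (ds : Int) (d : DequeA) (dq : List String) (h : InvDQ ds d dq) :
    (dqPopBack d).2 = dq.getLast?.getD "error" ∧ InvDQ ds (dqPopBack d).1 dq.dropLast := by
  obtain ⟨hm, hl, hpos, hneg⟩ := h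
  unfold dqPopBack
  cases dq with
  | nil =>
    have hl0 : d.len ≤ 0 := by simp at hl; omega
    rw [if_pos hl0]
    exact ⟨rfl, hm, hl, hpos, hneg⟩
  | cons v rest =>
    have hds : 0 < ds := by
      by_contra hc
      exact absurd (hneg (by omega)) (by simp)
    obtain ⟨hle, hvlen, hh0, hhlt, htail, hwin⟩ := hpos hds
    have hlen : d.len = (rest.length : Int) + 1 := by simp at hl; omega
    rw [if_neg (by omega)]
    constructor
    · have hlast := hwin ((v :: rest).length - 1) (by simp)
      rw [← List.getLast?_eq_getElem?] at hlast
      have hidx : PySem.Int.mod (d.head - 1 - (((v :: rest).length - 1 : Nat) : Int)) ds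
          = PySem.Int.mod (d.head - d.len) ds := by
        congr 1
        simp only [List.length_cons]
        push_cast
        omega
      rw [hidx] at hlast
      have htail' : d.tail = PySem.Int.mod (d.head - d.len) ds := htail.symm
      rw [htail', PySem.List.pyGetD_of_nonneg _ _ (PySem.Int.mod_nonneg _ hds),
        List.getD_eq_getElem?_getD, ← hlast]
      have hg : (v :: rest).getLast? = some ((v :: rest).getLast (by simp)) :=
        List.getLast?_eq_some_getLast (by simp)
      rw [hg]
      rfl
    · refine ⟨hm, by simp; omega, fun _ => ?_, fun h0 => absurd hds (by omega)⟩
      refine ⟨by simp at hle ⊢; omega, hvlen, hh0, hhlt, ?_, ?_⟩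
      · show PySem.Int.mod (d.head - (d.len - 1)) ds = PySem.Int.mod (d.tail + 1) d.maxLen
        rw [hm, ← htail]
        simp only [PySem.Int.mod_eq_emod_of_pos hds]
        rw [emod_shift]
        congr 1
        ring
      · intro i hi
        simp only [List.length_dropLast, List.length_cons] at hi
        rw [List.getElem?_dropLast, if_pos (by simpa using hi)]
        exact hwin i (by simp; omega)

lemma pushFront_lemma (ds : Int) (d : DequeA) (dq : List String) (v : String) (h : InvDQ ds d dq) :
    (dqPushFront d v).2 = (if (dq.length : Int) ≥ ds then some "error" else none) ∧
    InvDQ ds (dqPushFront d v).1 (if (dq.length : Int) ≥ ds then dq else v :: dq) := by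
  obtain ⟨hm, hl, hpos, hneg⟩ := h
  unfold dqPushFront
  by_cases hge : (dq.length : Int) ≥ ds
  · rw [if_pos (by rw [hm, hl]; exact hge), if_pos hge, if_pos hge]
    exact ⟨rfl, hm, hl, hpos, hneg⟩
  · have hds : 0 < ds := by omega
    obtain ⟨hle, hvlen, hh0, hhlt, htail, hwin⟩ := hpos hds
    rw [if_neg (by rw [hm, hl]; exact hge), if_neg hge, if_neg hge]
    have hhnat : d.head.toNat < d.values.length := by omega
    refine ⟨rfl, hm, by simp [hl], fun _ => ?_, fun h0 => absurd hds (by omega)⟩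
    refine ⟨by simp; omega, ?_, PySem.Int.mod_nonneg _ (by rw [hm]; exact hds),
      by rw [hm]; exact PySem.Int.mod_lt _ hds, ?_, ?_⟩
    · show (PySem.List.pySetD d.values d.head v).length = ds.toNat
      rw [PySem.List.pySetD_of_nonneg _ _ hh0]
      simp [hvlen]
    · show PySem.Int.mod (PySem.Int.mod (d.head + 1) d.maxLen - (d.len + 1)) ds = d.tail
      rw [hm, ← htail]
      simp only [PySem.Int.mod_eq_emod_of_pos hds]
      rw [emod_shift_sub]
      congr 1
      ring
    · intro i hi
      show (v :: dq)[i]? = (PySem.List.pySetD d.values d.head v)[(PySem.Int.mod (PySem.Int.mod (d.head + 1) d.maxLen - 1 - (i : Int)) ds).toNat]?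
      rw [PySem.List.pySetD_of_nonneg _ _ hh0]
      have hidx : PySem.Int.mod (PySem.Int.mod (d.head + 1) d.maxLen - 1 - (i : Int)) ds
          = PySem.Int.mod (d.head - (i : Int)) ds := by
        rw [hm]
        simp only [PySem.Int.mod_eq_emod_of_pos hds]
        have e1 : (d.head + 1) % ds - 1 - (i : Int) = (d.head + 1) % ds - (1 + (i : Int)) := by ring
        rw [e1, emod_shift_sub]
        congr 1
        ring
      rw [hidx]
      cases i with
      | zero =>
        have hz : PySem.Int.mod (d.head - ((0 : Nat) : Int)) ds = d.head := by
          rw [PySem.Int.mod_eq_emod_of_pos hds]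
          push_cast
          rw [sub_zero]
          exact Int.emod_eq_of_lt hh0 hhlt
        rw [hz]
        simp [List.getElem?_set_self hhnat]
      | succ j =>
        have hne : PySem.Int.mod (d.head - ((j : Int) + 1)) ds ≠ d.head := by
          apply mod_sub_ne ds d.head ((j : Int) + 1) hds hh0 hhlt (by omega)
          simp at hi
          omega
        have hcast : ((j + 1 : Nat) : Int) = (j : Int) + 1 := by push_cast; ring
        rw [hcast]
        have hnn : 0 ≤ PySem.Int.mod (d.head - ((j : Int) + 1)) ds := PySem.Int.mod_nonneg _ hds
        have hsub : d.head - ((j : Int) + 1) = d.head - 1 - (j : Int) := by ring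
        rw [List.getElem?_cons_succ, List.getElem?_set_ne (by omega)]
        have hw := hwin j (by simp at hi; omega)
        rw [hw]
        congr 3
        ring

lemma pushBack_lemma (ds : Int) (d : DequeA) (dq : List String) (v : String) (h : InvDQ ds d dq) :
    (dqPushBack d v).2 = (if (dq.length : Int) ≥ ds then some "error" else none) ∧
    InvDQ ds (dqPushBack d v).1 (if (dq.length : Int) ≥ ds then dq else dq ++ [v]) := by
  obtain ⟨hm, hl, hpos, hneg⟩ := h
  unfold dqPushBack
  by_cases hge : (dq.length : Int) ≥ ds
  · rw [if_pos (by rw [hm, hl]; exact hge), if_pos hge, if_pos hge]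
    exact ⟨rfl, hm, hl, hpos, hneg⟩
  · have hds : 0 < ds := by omega
    obtain ⟨hle, hvlen, hh0, hhlt, htail, hwin⟩ := hpos hds
    rw [if_neg (by rw [hm, hl]; exact hge), if_neg hge, if_neg hge]
    have htl : PySem.Int.mod (d.tail - 1) d.maxLen = PySem.Int.mod (d.head - d.len - 1) ds := by
      rw [hm, ← htail]
      simp only [PySem.Int.mod_eq_emod_of_pos hds]
      rw [emod_shift_sub]
    have ht0 : 0 ≤ PySem.Int.mod (d.tail - 1) d.maxLen := by
      rw [htl]; exact PySem.Int.mod_nonneg _ hds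
    have htlt : PySem.Int.mod (d.tail - 1) d.maxLen < ds := by
      rw [htl]; exact PySem.Int.mod_lt _ hds
    have htnat : (PySem.Int.mod (d.tail - 1) d.maxLen).toNat < d.values.length := by omega
    refine ⟨rfl, hm, by simp [hl], fun _ => ?_, fun h0 => absurd hds (by omega)⟩
    refine ⟨by simp; omega, ?_, hh0, hhlt, ?_, ?_⟩
    · show (PySem.List.pySetD d.values (PySem.Int.mod (d.tail - 1) d.maxLen) v).length = ds.toNat
      rw [PySem.List.pySetD_of_nonneg _ _ ht0]
      simp [hvlen]
    · show PySem.Int.mod (d.head - (d.len + 1)) ds = PySem.Int.mod (d.tail - 1) d.maxLen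
      rw [htl]
      simp only [PySem.Int.mod_eq_emod_of_pos hds]
      congr 1
      ring
    · intro i hi
      show (dq ++ [v])[i]? = (PySem.List.pySetD d.values (PySem.Int.mod (d.tail - 1) d.maxLen) v)[(PySem.Int.mod (d.head - 1 - (i : Int)) ds).toNat]?
      rw [PySem.List.pySetD_of_nonneg _ _ ht0]
      by_cases hilt : i < dq.length
      · rw [List.getElem?_append_left hilt]
        have hne : PySem.Int.mod (d.head - 1 - (i : Int)) ds ≠ PySem.Int.mod (d.tail - 1) d.maxLen := by
          rw [htl]
          intro hEq
          simp only [PySem.Int.mod_eq_emod_of_pos hds] at hEq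
          have h2 : ((d.head - 1 - (i : Int)) - (d.head - d.len - 1)) % ds = 0 :=
            Int.emod_eq_emod_iff_emod_sub_eq_zero.mp hEq
          have h3 : ds ∣ (d.len - (i : Int)) := by
            have he : (d.head - 1 - (i : Int)) - (d.head - d.len - 1) = d.len - (i : Int) := by ring
            rw [he] at h2
            exact Int.dvd_of_emod_eq_zero h2
          have h4 := Int.le_of_dvd (by omega) h3
          omega
        have hnn : 0 ≤ PySem.Int.mod (d.head - 1 - (i : Int)) ds := PySem.Int.mod_nonneg _ hds
        rw [List.getElem?_set_ne (by omega)]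
        exact hwin i hilt
      · have hieq : i = dq.length := by simp at hi; omega
        subst hieq
        rw [List.getElem?_append_right (le_refl _)]
        simp only [Nat.sub_self, List.getElem?_cons_zero]
        have hidx : PySem.Int.mod (d.head - 1 - (dq.length : Int)) ds = PySem.Int.mod (d.tail - 1) d.maxLen := by
          rw [htl, hl]
          congr 1
          ring
        rw [hidx]
        exact (List.getElem?_set_self htnat).symm

lemma stepA_pres (ds : Int) (arr : List String) (d : DequeA) (dq : List String) (c : String)
    (h : InvDQ ds d dq) :
    (solveStepA (arr, d) c).1 = (solveStepG ds (arr, dq) c).1 ∧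
    InvDQ ds (solveStepA (arr, d) c).2 (solveStepG ds (arr, dq) c).2 := by
  by_cases hc1 : c = "pop_front"
  · obtain ⟨hval, hinv⟩ := popFront_lemma ds d dq h
    simp only [solveStepA, solveStepG, if_pos hc1]
    cases dq with
    | nil => exact ⟨by simp [hval], hinv⟩
    | cons v rest => exact ⟨by simp [hval], hinv⟩
  · by_cases hc2 : c = "pop_back"
    · obtain ⟨hval, hinv⟩ := popBack_lemma ds d dq h
      simp only [solveStepA, solveStepG, if_neg hc1, if_pos hc2]
      cases dq with
      | nil => exact ⟨by simp [hval], hinv⟩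
      | cons v rest =>
        refine ⟨?_, hinv⟩
        have hg : (v :: rest).getLast? = some ((v :: rest).getLast (by simp)) :=
          List.getLast?_eq_some_getLast (by simp)
        simp [hval, hg]
    · simp only [solveStepA, solveStepG, if_neg hc1, if_neg hc2]
      by_cases hn1 : PySem.List.pyGetD ((PySem.Str.split? c " ").getD []) 0 "" = "push_front"
      · have hpf := pushFront_lemma ds d dq
          (PySem.List.pyGetD ((PySem.Str.split? c " ").getD []) 1 "") h
        rw [if_pos hn1, if_pos (Or.inl hn1)]
        by_cases hge : (dq.length : Int) ≥ ds
        · simp only [if_pos hge] at hpf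
          rw [if_pos hge]
          exact ⟨by simp [hpf.1], hpf.2⟩
        · simp only [if_neg hge] at hpf
          rw [if_neg hge, if_pos hn1]
          exact ⟨by simp [hpf.1], hpf.2⟩
      · by_cases hn2 : PySem.List.pyGetD ((PySem.Str.split? c " ").getD []) 0 "" = "push_back"
        · have hpb := pushBack_lemma ds d dq
            (PySem.List.pyGetD ((PySem.Str.split? c " ").getD []) 1 "") h
          rw [if_neg hn1, if_pos hn2, if_pos (Or.inr hn2)]
          by_cases hge : (dq.length : Int) ≥ ds
          · simp only [if_pos hge] at hpb
            rw [if_pos hge]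
            exact ⟨by simp [hpb.1], hpb.2⟩
          · simp only [if_neg hge] at hpb
            rw [if_neg hge, if_neg hn1]
            exact ⟨by simp [hpb.1], hpb.2⟩
        · rw [if_neg hn1, if_neg hn2, if_neg (by simp [hn1, hn2])]
          exact ⟨rfl, h⟩

lemma foldlA_pres (ds : Int) (cmds : List String) (arr : List String) (d : DequeA) (dq : List String)
    (h : InvDQ ds d dq) :
    (cmds.foldl solveStepA (arr, d)).1 = (cmds.foldl (solveStepG ds) (arr, dq)).1 := by
  induction cmds generalizing arr d dq with
  | nil => rfl
  | cons c rest ih =>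
    obtain ⟨h1, h2⟩ := stepA_pres ds arr d dq c h
    simp only [List.foldl_cons]
    have e1 : solveStepA (arr, d) c = ((solveStepA (arr, d) c).1, (solveStepA (arr, d) c).2) := rfl
    have e2 : solveStepG ds (arr, dq) c = ((solveStepG ds (arr, dq) c).1, (solveStepG ds (arr, dq) c).2) := rfl
    rw [e1, e2, h1]
    exact ih _ _ _ h2

-- B-side simulation: the two stacks represent the ghost list via F.reverse ++ Bk.
lemma stepB_pres (ds : Int) (out F Bk : List String) (c : String) :
    (solveStepB ds (out, F, Bk) c).1 = (solveStepG ds (out, F.reverse ++ Bk) c).1 ∧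
    (solveStepB ds (out, F, Bk) c).2.1.reverse ++ (solveStepB ds (out, F, Bk) c).2.2
      = (solveStepG ds (out, F.reverse ++ Bk) c).2 := by
  by_cases hc1 : c = "pop_front"
  · subst hc1
    by_cases hF : F = []
    · subst hF
      by_cases hB : Bk = []
      · subst hB
        simp [solveStepB, solveStepG]
      · obtain ⟨v, rest, rfl⟩ := List.exists_cons_of_ne_nil hB
        simp [solveStepB, solveStepG, List.getLast?_reverse]
    · obtain ⟨F', x, rfl⟩ := (List.eq_nil_or_concat F).resolve_left hF
      simp [solveStepB, solveStepG]
  · by_cases hc2 : c = "pop_back"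
    · subst hc2
      by_cases hB : Bk = []
      · subst hB
        by_cases hF : F = []
        · subst hF
          simp [solveStepB, solveStepG]
        · obtain ⟨v, rest, rfl⟩ := List.exists_cons_of_ne_nil hF
          simp [solveStepB, solveStepG, List.getLast?_reverse]
      · obtain ⟨v, rest, rfl⟩ := List.exists_cons_of_ne_nil hB
        have hsome : (v :: rest).getLast? = some ((v :: rest).getLast (by simp)) :=
          List.getLast?_eq_some_getLast (by simp)
        simp [solveStepB, solveStepG, List.dropLast_append_of_ne_nil, hsome]
    · simp only [solveStepB, solveStepG, if_neg hc1, if_neg hc2]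
      rw [show ((F.reverse ++ Bk).length : Int) = (F.length : Int) + (Bk.length : Int) from by simp]
      refine ⟨?_, ?_⟩ <;> split_ifs <;> simp

lemma foldlB_pres (ds : Int) (cmds : List String) (out F Bk : List String) :
    (cmds.foldl (solveStepB ds) (out, F, Bk)).1
      = (cmds.foldl (solveStepG ds) (out, F.reverse ++ Bk)).1 := by
  induction cmds generalizing out F Bk with
  | nil => rfl
  | cons c rest ih =>
    obtain ⟨h1, h2⟩ := stepB_pres ds out F Bk c
    simp only [List.foldl_cons]
    have e1 : solveStepB ds (out, F, Bk) c
        = ((solveStepB ds (out, F, Bk) c).1, (solveStepB ds (out, F, Bk) c).2.1,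
           (solveStepB ds (out, F, Bk) c).2.2) := rfl
    have e2 : solveStepG ds (out, F.reverse ++ Bk) c
        = ((solveStepG ds (out, F.reverse ++ Bk) c).1, (solveStepG ds (out, F.reverse ++ Bk) c).2) := rfl
    rw [e1, e2, ← h2, ← h1]
    exact ih _ _ _

-- ===== VERDICT (by name: the statement is the Claim_ definition above) =====
theorem solve_spec : Claim_equal_solve := by
  intro ds cmds _ _
  unfold Spec_solve solve solve_alt
  rw [foldlA_pres ds cmds [] (dqInit ds) [] (invDQ_init ds)]
  exact (foldlB_pres ds cmds [] [] []).symm
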